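-- pv_equiv track=rewrite | github.com/AI-HealthCare-01/AI_01_05 | app/services/ocr_service.py | _find_header_end
-- ===== SOURCE A (Python) =====
-- def _find_header_end(lines: list[str], header_keywords: set[str]) -> int:
--     header_end = 0
--     in_header = False
--     for i, line in enumerate(lines):
--         if line.strip() in header_keywords:
--             in_header = True
--             header_end = i + 1
--         elif in_header:
--             break
--     return header_end
-- ===== SOURCE B (Python) =====
-- def _find_header_end(lines: list[str], header_keywords: set[str]) -> int:
--     # locate-then-measure: precompute keyword flags, find the first keyword line,
--     # then advance past the contiguous keyword run starting there.
--     flags = [line.strip() in header_keywords for line in lines]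
--     if True not in flags:
--         return 0
--     end = flags.index(True)
--     while end < len(flags) and flags[end]:
--         end += 1
--     return end
-- ===== Notes on version B (the rewrite author's own statement) =====
-- stated objective: alternative
-- what changed: Replaces A's single flag-driven loop with break by a locate-then-measure decomposition: precompute stripped-in-keywords flags, find the first True with list.index, then advance an index over the contiguous True run.
import Mathlib
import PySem

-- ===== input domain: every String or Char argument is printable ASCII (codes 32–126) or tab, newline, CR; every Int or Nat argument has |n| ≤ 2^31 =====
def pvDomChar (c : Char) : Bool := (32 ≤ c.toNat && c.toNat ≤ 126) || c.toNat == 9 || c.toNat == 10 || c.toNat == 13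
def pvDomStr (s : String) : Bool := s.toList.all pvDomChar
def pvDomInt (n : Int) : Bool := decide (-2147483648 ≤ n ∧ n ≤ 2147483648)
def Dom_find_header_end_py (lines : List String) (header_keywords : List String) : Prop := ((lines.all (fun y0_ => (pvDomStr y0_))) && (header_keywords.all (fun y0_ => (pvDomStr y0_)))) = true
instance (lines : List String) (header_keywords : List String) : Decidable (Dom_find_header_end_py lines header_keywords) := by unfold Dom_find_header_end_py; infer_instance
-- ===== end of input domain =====

-- B replaces A's flag-driven loop-with-break by a locate-then-measure decomposition (same O(n) cost; objective: alternative).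

-- ===== PORT A =====
-- the for-loop of A with its break, state (header_end, in_header), i the enumerate counter
def findHeaderLoopA (kw : List String) : List String → Nat → Int → Bool → Int
  | [], _, header_end, _ => header_end
  | line :: rest, i, header_end, in_header =>
    if kw.contains (PySem.Str.strip line) then
      findHeaderLoopA kw rest (i + 1) ((i : Int) + 1) true
    else if in_header then header_end
    else findHeaderLoopA kw rest (i + 1) header_end in_header

def find_header_end_py (lines : List String) (header_keywords : List String) : Int :=
  findHeaderLoopA header_keywords lines 0 0 false

-- ===== PORT B =====
-- the while-loop of Source B: advance `end` while flags[end] is True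
def runEndB (flags : List Bool) (e : Nat) : Nat :=
  if e < flags.length && flags.getD e false then runEndB flags (e + 1) else e
termination_by flags.length - e
decreasing_by
  rename_i h; simp only [Bool.and_eq_true, decide_eq_true_eq] at h; omega

def find_header_end_py_alt (lines : List String) (header_keywords : List String) : Int :=
  let flags := lines.map (fun line => header_keywords.contains (PySem.Str.strip line))
  match PySem.List.index? flags true with
  | none => 0                      -- "if True not in flags: return 0"
  | some s => (runEndB flags s : Int)

-- ===== PRECONDITION & SPEC =====
def Spec_find_header_end_py (lines : List String) (header_keywords : List String) (out : Int) : Prop := out = find_header_end_py_alt lines header_keywords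
instance (lines : List String) (header_keywords : List String) (out : Int) : Decidable (Spec_find_header_end_py lines header_keywords out) := by unfold Spec_find_header_end_py; infer_instance

-- ===== CLAIM (what is proved, stated in full; the proofs are below) =====
def Claim_equal_find_header_end_py : Prop := ∀ (lines : List String) (header_keywords : List String), Dom_find_header_end_py lines header_keywords → Spec_find_header_end_py lines header_keywords (find_header_end_py lines header_keywords)

-- ===== LEMMAS AND PROOFS =====

-- length of the leading run of `true`s
def leadTrue : List Bool → Nat
  | [] => 0
  | b :: fs => if b then leadTrue fs + 1 else 0

theorem runEndB_eq (fs : List Bool) (e : Nat) (he : e ≤ fs.length) :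
    runEndB fs e = e + leadTrue (fs.drop e) := by
  rw [runEndB]
  by_cases hlt : e < fs.length
  · have hdrop : fs.drop e = fs[e] :: fs.drop (e + 1) := List.drop_eq_getElem_cons hlt
    by_cases hb : fs[e] = true
    · have hgd : fs.getD e false = true := by rw [List.getD_eq_getElem _ _ hlt, hb]
      simp only [hlt, hgd, decide_true, Bool.and_self, if_true]
      rw [runEndB_eq fs (e + 1) (by omega), hdrop]
      simp [leadTrue, hb]; omega
    · have hgd : fs.getD e false = false := by
        rw [List.getD_eq_getElem _ _ hlt]; simpa using hb
      simp only [hgd, Bool.and_false]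
      rw [hdrop]; simp [leadTrue, hb]
  · have : fs.drop e = [] := List.drop_eq_nil_of_le (by omega)
    simp [hlt, this, leadTrue]
termination_by fs.length - e

-- A's loop once in_header is true with header_end = i
theorem loopA_in (kw : List String) (ls : List String) (i : Nat) :
    findHeaderLoopA kw ls i (i : Int) true
      = ((i : Int) + leadTrue (ls.map (fun l => kw.contains (PySem.Str.strip l)))) := by
  induction ls generalizing i with
  | nil => simp [findHeaderLoopA, leadTrue]
  | cons l rest ih =>
    by_cases h : kw.contains (PySem.Str.strip l)
    · simp only [findHeaderLoopA, h, if_true, List.map_cons, leadTrue]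
      rw [show ((i : Int) + 1) = ((i + 1 : Nat) : Int) by push_cast; ring, ih (i + 1)]
      push_cast; ring
    · have h' : PySem.Str.strip l ∉ kw := by simpa using h
      simp [findHeaderLoopA, leadTrue, h']

-- A's loop before any keyword was seen
theorem loopA_out (kw : List String) (ls : List String) (i : Nat) :
    findHeaderLoopA kw ls i 0 false
      = (match PySem.List.index? (ls.map (fun l => kw.contains (PySem.Str.strip l))) true with
         | none => (0 : Int)
         | some s => ((i : Int) + s + 1
             + leadTrue ((ls.map (fun l => kw.contains (PySem.Str.strip l))).drop (s + 1)))) := by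
  induction ls generalizing i with
  | nil => simp [findHeaderLoopA, PySem.List.index?]
  | cons l rest ih =>
    by_cases h : kw.contains (PySem.Str.strip l)
    · simp only [findHeaderLoopA, h, if_true, List.map_cons]
      rw [show ((i : Int) + 1) = ((i + 1 : Nat) : Int) by push_cast; ring,
        loopA_in kw rest (i + 1), PySem.List.index?_cons_self]
      simp only [List.drop_succ_cons, List.drop_zero]
      push_cast; ring
    · have hne : kw.contains (PySem.Str.strip l) = false := by simpa using h
      simp only [findHeaderLoopA, hne, Bool.false_eq_true, if_false, List.map_cons]
      have hstep : PySem.List.index? (false :: rest.map (fun l => kw.contains (PySem.Str.strip l))) true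
          = (PySem.List.index? (rest.map (fun l => kw.contains (PySem.Str.strip l))) true).map (· + 1) :=
        PySem.List.index?_cons_of_ne _ (by decide)
      rw [ih (i + 1), hstep]
      cases hidx : PySem.List.index? (rest.map (fun l => kw.contains (PySem.Str.strip l))) true with
      | none => simp
      | some s =>
        simp only [Option.map_some]
        rw [List.drop_succ_cons]
        push_cast; ring_nf

-- ===== VERDICT (by name: the statement is the Claim_ definition above) =====
theorem find_header_end_py_spec : Claim_equal_find_header_end_py := by
  intro lines kw _
  unfold Spec_find_header_end_py find_header_end_py find_header_end_py_alt
  rw [loopA_out kw lines 0]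
  cases hidx : PySem.List.index? (lines.map (fun l => kw.contains (PySem.Str.strip l))) true with
  | none => dsimp only; rw [hidx]
  | some s =>
    obtain ⟨hk, hget, -⟩ := PySem.List.getElem_of_index?_eq_some hidx
    dsimp only
    rw [hidx]
    dsimp only
    rw [runEndB_eq _ s (le_of_lt hk)]
    rw [List.drop_eq_getElem_cons hk, hget]
    simp only [leadTrue, if_true]
    push_cast; ring
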